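-- pv_equiv track=rewrite | github.com/danieldube/cpp_header_guard | src/header_guard/__init__.py | guard_end_index
-- ===== SOURCE A (Python) =====
-- from typing import Optional, Sequence, Tuple
--
-- def matches_endif(line: str, name: str) -> bool:
--     if not line.startswith("#endif"):
--         return False
--     return line == "#endif" or name in line
--
-- def guard_end_index(lines: list[str], name: str) -> Optional[int]:
--     indices = [idx for idx, line in enumerate(lines) if line.strip()]
--     if not indices:
--         return None
--     return (
--         indices[-1]
--         if matches_endif(lines[indices[-1]].strip(), name)
--         else None
--     )
-- ===== SOURCE B (Python) =====
-- from typing import Optional, Sequence, Tuple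
--
-- def matches_endif(line: str, name: str) -> bool:
--     if not line.startswith("#endif"):
--         return False
--     return line == "#endif" or name in line
--
-- def guard_end_index(lines: list[str], name: str) -> Optional[int]:
--     for idx in range(len(lines) - 1, -1, -1):
--         stripped = lines[idx].strip()
--         if stripped:
--             return idx if matches_endif(stripped, name) else None
--     return None
-- ===== Notes on version B (the rewrite author's own statement) =====
-- stated objective: simpler
-- what changed: B replaces A's full forward pass that materialises the list of all non-empty line indices (then takes its last element) with a single backward scan that returns at the first non-empty line.
import Mathlib
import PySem

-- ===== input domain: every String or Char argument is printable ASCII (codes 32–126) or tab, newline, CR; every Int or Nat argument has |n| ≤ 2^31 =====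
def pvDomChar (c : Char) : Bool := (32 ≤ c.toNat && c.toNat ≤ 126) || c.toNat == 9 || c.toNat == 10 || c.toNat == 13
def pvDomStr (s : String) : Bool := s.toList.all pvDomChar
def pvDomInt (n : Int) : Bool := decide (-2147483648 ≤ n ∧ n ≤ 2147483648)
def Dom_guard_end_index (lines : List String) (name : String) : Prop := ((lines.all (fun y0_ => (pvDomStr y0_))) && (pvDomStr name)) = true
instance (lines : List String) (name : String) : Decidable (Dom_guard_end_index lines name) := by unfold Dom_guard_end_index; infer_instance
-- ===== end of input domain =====

-- ===== PORT A =====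
-- B replaces A's forward pass over all indices with a backward scan stopping at the first non-empty line; return values proved equal on Dom.
def matches_endif (line : String) (name : String) : Bool :=
  if ¬ PySem.Str.startswith line "#endif" then false
  else line == "#endif" || PySem.Str.isIn name line

-- the list comprehension 'indices' of A
def pvIndices (lines : List String) : List Int :=
  ((PySem.List.enumerate lines).filter (fun p => PySem.Str.strip p.2 != "")).map Prod.fst

def guard_end_index (lines : List String) (name : String) : Option Int :=
  match (pvIndices lines).getLast? with
  | none => none
  | some i =>
    if matches_endif (PySem.Str.strip ((PySem.List.pyGet? lines i).getD "")) name then some i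
    else none

-- ===== PORT B =====
-- the decrementing 'for idx in range(len(lines)-1, -1, -1)' loop; k = idx + 1
def pvAltLoop (lines : List String) (name : String) : Nat → Option Int
  | 0 => none
  | (i+1) =>
    let stripped := PySem.Str.strip (lines.getD i "")
    if stripped ≠ "" then (if matches_endif stripped name then some (i : Int) else none)
    else pvAltLoop lines name i

def guard_end_index_alt (lines : List String) (name : String) : Option Int :=
  pvAltLoop lines name lines.length

-- ===== PRECONDITION & SPEC =====
def Spec_guard_end_index (lines : List String) (name : String) (out : Option Int) : Prop := out = guard_end_index_alt lines name
instance (lines : List String) (name : String) (out : Option Int) : Decidable (Spec_guard_end_index lines name out) := by unfold Spec_guard_end_index; infer_instance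

-- ===== CLAIM (what is proved, stated in full; the proofs are below) =====
def Claim_equal_guard_end_index : Prop := ∀ (lines : List String) (name : String), Dom_guard_end_index lines name → Spec_guard_end_index lines name (guard_end_index lines name)

-- ===== LEMMAS AND PROOFS =====

theorem mem_pvIndices {lines : List String} {i : Int} (h : i ∈ pvIndices lines) :
    ∃ k : Nat, k < lines.length ∧ i = (k : Int) := by
  unfold pvIndices at h
  simp only [List.mem_map, List.mem_filter] at h
  obtain ⟨p, ⟨hp, _⟩, rfl⟩ := h
  rw [PySem.List.mem_enumerate_iff] at hp
  obtain ⟨k, hk, rfl⟩ := hp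
  exact ⟨k, hk, by simp⟩

theorem pvIndices_append (lines : List String) (x : String) :
    pvIndices (lines ++ [x]) =
      pvIndices lines ++
        (if PySem.Str.strip x ≠ "" then [(lines.length : Int)] else []) := by
  unfold pvIndices
  rw [PySem.List.enumerate_append, List.filter_append, List.map_append]
  congr 1
  by_cases h : PySem.Str.strip x ≠ "" <;>
    simp [PySem.List.enumerate, List.filter, h]

theorem pvAltLoop_append (lines : List String) (x : String) (name : String)
    (k : Nat) (hk : k ≤ lines.length) :
    pvAltLoop (lines ++ [x]) name k = pvAltLoop lines name k := by
  induction k with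
  | zero => rfl
  | succ i ih =>
    have hi : i < lines.length := hk
    simp only [pvAltLoop, List.getD_append _ _ _ _ hi]
    rw [ih (Nat.le_of_lt hi)]

theorem guard_eq (lines : List String) (name : String) :
    guard_end_index lines name = guard_end_index_alt lines name := by
  induction lines using List.reverseRecOn with
  | nil => rfl
  | append_singleton xs x ih =>
    have hlen : (xs ++ [x]).length = xs.length + 1 := by simp
    have hg : (xs ++ [x]).getD xs.length "" = x := by
      rw [List.getD_append_right _ _ _ _ (Nat.le_refl _), Nat.sub_self]; rfl
    by_cases hx : PySem.Str.strip x ≠ ""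
    · -- last line is non-empty: both sides decide on x at index xs.length
      unfold guard_end_index guard_end_index_alt
      rw [pvIndices_append, if_pos hx]
      have h1 : (pvIndices xs ++ [(xs.length : Int)]).getLast? = some (xs.length : Int) := by
        simp
      rw [h1, hlen]
      simp only [pvAltLoop, hg]
      have hget : PySem.List.pyGet? (xs ++ [x]) ((xs.length : Nat) : Int) = some x := by
        rw [PySem.List.pyGet?_natCast]; simp
      rw [hget]
      simp [hx]
    · -- last line is blank: both sides ignore it
      rw [not_ne_iff] at hx
      unfold guard_end_index guard_end_index_alt at ih ⊢
      rw [pvIndices_append, if_neg (by simp [hx]), List.append_nil, hlen]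
      simp only [pvAltLoop, hg]
      rw [if_neg (by simp [hx]), pvAltLoop_append xs x name xs.length (Nat.le_refl _)]
      cases hlast : (pvIndices xs).getLast? with
      | none => rw [hlast] at ih; exact ih
      | some i =>
        rw [hlast] at ih
        dsimp only at ih ⊢
        obtain ⟨k, hk, rfl⟩ := mem_pvIndices (List.mem_of_getLast? hlast)
        rw [PySem.List.pyGet?_natCast, List.getElem?_append_left hk,
          ← PySem.List.pyGet?_natCast]
        exact ih

-- ===== VERDICT (by name: the statement is the Claim_ definition above) =====
theorem guard_end_index_spec : Claim_equal_guard_end_index := by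
  intro lines name _
  unfold Spec_guard_end_index
  exact guard_eq lines name
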